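-- pv_equiv track=rewrite | github.com/Ktiseos-Nyx/Dataset-Tools | tests/smart_rule_discoverer.py | _classify_config_type
-- ===== SOURCE A (Python) =====
-- from typing import Dict, List, Set, Any, Optional, Tuple
--
-- def _classify_config_type(data: Dict[str, Any]) -> str:
--     """Classify the type of configuration"""
--     keys = set(k.lower() for k in data.keys())
--
--     if any(ui_term in keys for ui_term in ["ui", "interface", "theme", "layout"]):
--         return "ui_config"
--     elif any(model_term in keys for model_term in ["model", "checkpoint", "lora", "embedding"]):
--         return "model_config"
--     elif any(gen_term in keys for gen_term in ["generation", "sampling", "steps", "cfg"]):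
--         return "generation_config"
--     else:
--         return "general_config"
-- ===== SOURCE B (Python) =====
-- _CATS = ("ui_config", "model_config", "generation_config", "general_config")
-- _RANK = {
--     "ui": 0, "interface": 0, "theme": 0, "layout": 0,
--     "model": 1, "checkpoint": 1, "lora": 1, "embedding": 1,
--     "generation": 2, "sampling": 2, "steps": 2, "cfg": 2,
-- }
--
-- def _classify_config_type(data):
--     """Classify the type of configuration"""
--     best = 3
--     for k in data:
--         r = _RANK.get(k.lower(), 3)
--         if r < best:
--             best = r
--             if best == 0:
--                 break
--     return _CATS[best]
-- ===== Notes on version B (the rewrite author's own statement) =====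
-- stated objective: alternative
-- what changed: B replaces A's key-set plus chain of term-list membership tests by a single-pass running-minimum fold: each key is mapped to a numeric priority rank, the loop keeps the smallest rank seen (breaking early at rank 0), and the answer is the category tuple indexed by that minimum.
import Mathlib
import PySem

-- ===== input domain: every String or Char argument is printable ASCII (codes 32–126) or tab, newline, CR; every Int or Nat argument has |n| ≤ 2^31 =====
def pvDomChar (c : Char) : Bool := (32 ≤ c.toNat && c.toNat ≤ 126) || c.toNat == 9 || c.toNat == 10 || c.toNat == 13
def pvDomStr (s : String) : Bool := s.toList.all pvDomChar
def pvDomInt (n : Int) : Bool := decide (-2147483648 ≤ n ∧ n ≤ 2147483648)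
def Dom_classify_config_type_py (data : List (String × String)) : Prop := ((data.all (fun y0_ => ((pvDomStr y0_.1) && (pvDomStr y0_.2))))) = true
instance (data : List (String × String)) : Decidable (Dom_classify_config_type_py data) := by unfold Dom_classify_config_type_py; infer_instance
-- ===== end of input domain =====

-- B replaces A's key-set and chain of term-list membership tests by a single-pass
-- running-minimum fold over numeric priority ranks with early exit (alternative algorithm, same cost).

-- ===== PORT A =====
def classify_config_type_py (data : List (String × String)) : String :=
  let keys : PySem.Set String :=
    PySem.Set.ofList (data.map (fun kv => PySem.Str.lower kv.1))
  if ["ui", "interface", "theme", "layout"].any (fun t => PySem.Set.contains keys t) then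
    "ui_config"
  else if ["model", "checkpoint", "lora", "embedding"].any (fun t => PySem.Set.contains keys t) then
    "model_config"
  else if ["generation", "sampling", "steps", "cfg"].any (fun t => PySem.Set.contains keys t) then
    "generation_config"
  else
    "general_config"

-- ===== PORT B =====
def pvRank : PySem.Dict String Int :=
  PySem.Dict.ofList
  [("ui", 0), ("interface", 0), ("theme", 0), ("layout", 0),
   ("model", 1), ("checkpoint", 1), ("lora", 1), ("embedding", 1),
   ("generation", 2), ("sampling", 2), ("steps", 2), ("cfg", 2)]

-- the for-loop of Source B, with its early 'break' on best == 0
def pvBLoop : List (String × String) → Int → Int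
  | [], best => best
  | kv :: rest, best =>
    let r := pvRank.getD (PySem.Str.lower kv.1) 3
    if r < best then
      if r = 0 then r else pvBLoop rest r
    else pvBLoop rest best

def classify_config_type_py_alt (data : List (String × String)) : String :=
  let best := pvBLoop data 3
  -- _CATS[best], written as a case split on the index
  if best = 0 then "ui_config"
  else if best = 1 then "model_config"
  else if best = 2 then "generation_config"
  else "general_config"

-- ===== PRECONDITION & SPEC =====
def Spec_classify_config_type_py (data : List (String × String)) (out : String) : Prop := out = classify_config_type_py_alt data
instance (data : List (String × String)) (out : String) : Decidable (Spec_classify_config_type_py data out) := by unfold Spec_classify_config_type_py; infer_instance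

-- ===== CLAIM (what is proved, stated in full; the proofs are below) =====
def Claim_equal_classify_config_type_py : Prop := ∀ (data : List (String × String)), Dom_classify_config_type_py data → Spec_classify_config_type_py data (classify_config_type_py data)

-- ===== LEMMAS AND PROOFS =====

-- A's condition for a term list, reduced to a pointwise any over the lowered keys.
theorem aCond_eq (L : List String) (terms : List String) :
    (terms.any (fun t => PySem.Set.contains (PySem.Set.ofList L) t))
      = L.any (fun s => terms.contains s) := by
  rw [Bool.eq_iff_iff]
  simp only [List.any_eq_true, List.contains_iff_mem, PySem.Set.contains_iff,
    PySem.Set.mem_ofList]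
  constructor
  · rintro ⟨t, ht, hL⟩; exact ⟨t, hL, ht⟩
  · rintro ⟨s, hs, ht⟩; exact ⟨s, ht, hs⟩

-- the rank dict, characterised per lowered key
theorem rank_char (s : String) :
    pvRank.getD s 3
      = (if ["ui", "interface", "theme", "layout"].contains s then 0
         else if ["model", "checkpoint", "lora", "embedding"].contains s then 1
         else if ["generation", "sampling", "steps", "cfg"].contains s then 2
         else 3) := by
  by_cases h1 : s = "ui"
  · subst h1; decide
  by_cases h2 : s = "interface"
  · subst h2; decide
  by_cases h3 : s = "theme"
  · subst h3; decide
  by_cases h4 : s = "layout"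
  · subst h4; decide
  by_cases h5 : s = "model"
  · subst h5; decide
  by_cases h6 : s = "checkpoint"
  · subst h6; decide
  by_cases h7 : s = "lora"
  · subst h7; decide
  by_cases h8 : s = "embedding"
  · subst h8; decide
  by_cases h9 : s = "generation"
  · subst h9; decide
  by_cases h10 : s = "sampling"
  · subst h10; decide
  by_cases h11 : s = "steps"
  · subst h11; decide
  by_cases h12 : s = "cfg"
  · subst h12; decide
  have e : ∀ (t : String), s ≠ t → (t == s) = false := by
    intro t h
    simp only [beq_eq_false_iff_ne, ne_eq]
    exact fun hh => h hh.symm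
  have hD : pvRank = PySem.Dict.mk [("ui", 0), ("interface", 0), ("theme", 0), ("layout", 0), ("model", 1), ("checkpoint", 1), ("lora", 1), ("embedding", 1), ("generation", 2), ("sampling", 2), ("steps", 2), ("cfg", 2)] := by decide
  rw [hD, PySem.Dict.getD_eq_get?_getD]
  simp [PySem.Dict.get?, List.find?,
    e _ h1, e _ h2, e _ h3, e _ h4, e _ h5, e _ h6, e _ h7, e _ h8, e _ h9, e _ h10, e _ h11, e _ h12,
    h1, h2, h3, h4, h5, h6, h7, h8, h9, h10, h11, h12]

-- the intended minimum rank of a key list, as a priority cascade over anys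
def pvE (xs : List (String × String)) : Int :=
  if xs.any (fun kv => ["ui", "interface", "theme", "layout"].contains (PySem.Str.lower kv.1)) then 0
  else if xs.any (fun kv => ["model", "checkpoint", "lora", "embedding"].contains (PySem.Str.lower kv.1)) then 1
  else if xs.any (fun kv => ["generation", "sampling", "steps", "cfg"].contains (PySem.Str.lower kv.1)) then 2
  else 3

theorem pvE_bounds (xs : List (String × String)) : 0 ≤ pvE xs ∧ pvE xs ≤ 3 := by
  unfold pvE; split_ifs <;> omega

theorem pvE_cons (kv : String × String) (xs : List (String × String)) :
    pvE (kv :: xs) = min (pvRank.getD (PySem.Str.lower kv.1) 3) (pvE xs) := by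
  rw [rank_char]
  unfold pvE
  simp only [List.any_cons, Bool.or_eq_true]
  cases h1 : ["ui", "interface", "theme", "layout"].contains (PySem.Str.lower kv.1) <;>
  cases h2 : ["model", "checkpoint", "lora", "embedding"].contains (PySem.Str.lower kv.1) <;>
  cases h3 : ["generation", "sampling", "steps", "cfg"].contains (PySem.Str.lower kv.1) <;>
  cases h4 : xs.any (fun kv => ["ui", "interface", "theme", "layout"].contains (PySem.Str.lower kv.1)) <;>
  cases h5 : xs.any (fun kv => ["model", "checkpoint", "lora", "embedding"].contains (PySem.Str.lower kv.1)) <;>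
  cases h6 : xs.any (fun kv => ["generation", "sampling", "steps", "cfg"].contains (PySem.Str.lower kv.1)) <;>
    simp

theorem pvBLoop_eq (xs : List (String × String)) :
    ∀ best : Int, 0 ≤ best → best ≤ 3 → pvBLoop xs best = min best (pvE xs) := by
  induction xs with
  | nil =>
    intro best h0 h3
    unfold pvBLoop pvE
    simp only [List.any_nil, if_false, Bool.false_eq_true]
    omega
  | cons kv rest ih =>
    intro best h0 h3
    have hb0 := (pvE_bounds rest).1
    have hb3 := (pvE_bounds rest).2
    have hr03 : 0 ≤ pvRank.getD (PySem.Str.lower kv.1) 3 ∧ pvRank.getD (PySem.Str.lower kv.1) 3 ≤ 3 := by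
      rw [rank_char]; split_ifs <;> omega
    rw [pvE_cons]
    simp only [pvBLoop]
    by_cases hlt : pvRank.getD (PySem.Str.lower kv.1) 3 < best
    · rw [if_pos hlt]
      by_cases hz : pvRank.getD (PySem.Str.lower kv.1) 3 = 0
      · rw [if_pos hz]
        omega
      · rw [if_neg hz, ih _ hr03.1 hr03.2]
        omega
    · rw [if_neg hlt, ih best h0 h3]
      omega

-- ===== VERDICT (by name: the statement is the Claim_ definition above) =====
theorem classify_config_type_py_spec : Claim_equal_classify_config_type_py := by
  intro data _
  unfold Spec_classify_config_type_py classify_config_type_py classify_config_type_py_alt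
  rw [pvBLoop_eq data 3 (by omega) (by omega)]
  have hmin : min (3 : Int) (pvE data) = pvE data := by
    have := pvE_bounds data; omega
  rw [hmin]
  simp only [aCond_eq]
  have hmap : ∀ terms : List String,
      (data.map (fun kv => PySem.Str.lower kv.1)).any (fun s => List.contains terms s)
        = data.any (fun kv => List.contains terms (PySem.Str.lower kv.1)) := by
    intro terms; simp [List.any_map, Function.comp_def]
  simp only [hmap]
  unfold pvE
  split_ifs <;> simp_all
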